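-- pv_equiv track=rewrite | github.com/oeick/advent-of-code | 2017/06/python/main.py | solve
-- ===== SOURCE A (Python) =====
-- def solve(banks: list[int]) -> (int, int):
--     configs = [banks]
--     new_banks = redistribute_blocks(banks)
--     while new_banks not in configs:
--         configs.append(new_banks)
--         new_banks = redistribute_blocks(new_banks)
--     loop_start = configs.index(new_banks)
--     return len(configs), len(configs) - loop_start
--
-- def redistribute_blocks(banks: list[int]) -> list[int]:
--     blocks_to_redistribute = max(banks)
--     target_bank = banks.index(blocks_to_redistribute)
--     result = list(banks)
--     result[target_bank] = 0
--     for i in range(blocks_to_redistribute):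
--         target_bank = (target_bank + 1) % len(result)
--         result[target_bank] += 1
--     return result
-- ===== SOURCE B (Python) =====
-- def solve(banks: list[int]) -> (int, int):
--     seen = {tuple(banks): 0}
--     cur = redistribute(banks)
--     i = 1
--     while True:
--         key = tuple(cur)
--         if key in seen:
--             return i, i - seen[key]
--         seen[key] = i
--         i += 1
--         cur = redistribute(cur)
--
-- def redistribute(banks: list[int]) -> list[int]:
--     n = len(banks)
--     m = max(banks)
--     t = banks.index(m)
--     if m <= 0:
--         return [0 if j == t else banks[j] for j in range(n)]
--     q, r = divmod(m, n)
--     return [(0 if j == t else banks[j]) + q + (1 if (j - t - 1) % n < r else 0)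
--             for j in range(n)]
-- ===== Notes on version B (the rewrite author's own statement) =====
-- stated objective: alternative
-- what changed: B replaces A's per-iteration linear scan of the configuration history (plus the final list.index pass) with a dict mapping configuration to its first index, and computes each redistribution arithmetically with divmod (quotient to everyone, +1 to the first r banks after the target) instead of A's one-block-at-a-time loop.
import Mathlib
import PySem

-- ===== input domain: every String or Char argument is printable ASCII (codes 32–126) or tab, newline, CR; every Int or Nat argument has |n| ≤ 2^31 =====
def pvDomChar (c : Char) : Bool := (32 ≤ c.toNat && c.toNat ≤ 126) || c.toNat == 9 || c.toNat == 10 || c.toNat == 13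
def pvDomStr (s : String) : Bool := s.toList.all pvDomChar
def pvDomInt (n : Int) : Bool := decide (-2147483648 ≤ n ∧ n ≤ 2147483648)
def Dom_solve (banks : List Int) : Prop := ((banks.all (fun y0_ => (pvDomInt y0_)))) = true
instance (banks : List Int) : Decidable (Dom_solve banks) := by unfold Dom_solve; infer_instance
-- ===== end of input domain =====

-- B replaces A's list-history scan by a dict keyed by configuration (one lookup per step, no final
-- .index pass) and computes each redistribution in closed form (divmod) instead of A's
-- one-block-at-a-time loop; objective: alternative.

-- Fuel for the Lean ports of the two unbounded Python `while` loops. It only makes the recursions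
-- total: every reachable configuration keeps the sum of `banks` and never drops an entry below
-- min(0, min banks), so the number of distinct configurations is below this bound and the Python
-- loops (hence the ports) always answer before the fuel runs out.
def pvFuel (banks : List Int) : Nat :=
  let a := banks.foldl (fun acc b => acc + b.natAbs) 0
  (a * (banks.length + 1) + 1) ^ banks.length + 2

-- ===== PORT A =====
-- loop body of `for i in range(blocks_to_redistribute)`: target = (target+1) % len(result); result[target] += 1
-- (`result[target]` is exact as getD/set: target is always < length)
def stepA (st : Nat × List Int) : Nat × List Int :=
  let t := (st.1 + 1) % st.2.length
  (t, st.2.set t (st.2.getD t 0 + 1))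

def redistributeA (banks : List Int) : List Int :=
  match PySem.List.max? banks (fun x => x) with
  | none => []   -- unreachable under Pre_solve: Python's max([]) raises ValueError
  | some m =>
    let t0 : Nat := (PySem.List.index? banks m).getD 0   -- index exists: m ∈ banks
    let res0 := banks.set t0 0
    ((PySem.List.pyRange 0 m 1).foldl (fun st _ => stepA st) (t0, res0)).2

def loopA : Nat → List (List Int) → List Int → Int × Int
  | 0, _, _ => (0, 0)   -- fuel exhaustion, unreachable (see pvFuel)
  | fuel+1, configs, nw =>
    if nw ∈ configs then
      ((configs.length : Int),
        (configs.length : Int) - (((PySem.List.index? configs nw).getD 0 : Nat) : Int))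
    else loopA fuel (configs ++ [nw]) (redistributeA nw)

def solve (banks : List Int) : Int × Int :=
  loopA (pvFuel banks) [banks] (redistributeA banks)

-- ===== PORT B =====
def redistributeB (banks : List Int) : List Int :=
  match PySem.List.max? banks (fun x => x) with
  | none => []   -- unreachable under Pre_solve: Python's max([]) raises ValueError
  | some m =>
    let n : Int := PySem.List.len banks
    let t : Nat := (PySem.List.index? banks m).getD 0   -- index exists: m ∈ banks
    if m ≤ 0 then
      (PySem.List.pyRange 0 n 1).map
        (fun j => if j = (t : Int) then 0 else PySem.List.pyGetD banks j 0)
    else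
      let q := PySem.Int.floordiv m n
      let r := PySem.Int.mod m n
      (PySem.List.pyRange 0 n 1).map
        (fun j => (if j = (t : Int) then 0 else PySem.List.pyGetD banks j 0) + q
          + (if PySem.Int.mod (j - (t : Int) - 1) n < r then 1 else 0))

def loopB : Nat → PySem.Dict (List Int) Int → Int → List Int → Int × Int
  | 0, _, _, _ => (0, 0)   -- fuel exhaustion, unreachable (see pvFuel)
  | fuel+1, seen, i, cur =>
    match seen.get? cur with
    | some j => (i, i - j)
    | none => loopB fuel (seen.insert cur i) (i + 1) (redistributeB cur)

def solve_alt (banks : List Int) : Int × Int :=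
  loopB (pvFuel banks) ((PySem.Dict.empty : PySem.Dict (List Int) Int).insert banks 0) 1
    (redistributeB banks)

-- ===== PRECONDITION & SPEC =====
-- Pre_ excludes only the empty list, on which Python's max() raises ValueError (in both A and B).
def Pre_solve (banks : List Int) : Prop := banks ≠ []
instance (banks : List Int) : Decidable (Pre_solve banks) := by unfold Pre_solve; infer_instance
def pvWitness_solve : List Int := ([0, 2, 7, 0])

def Spec_solve (banks : List Int) (out : Int × Int) : Prop := out = solve_alt banks
instance (banks : List Int) (out : Int × Int) : Decidable (Spec_solve banks out) := by unfold Spec_solve; infer_instance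

-- ===== CLAIM (what is proved, stated in full; the proofs are below) =====
def Claim_equal_solve : Prop := ∀ (banks : List Int), Dom_solve banks → Pre_solve banks → Spec_solve banks (solve banks)

-- ===== LEMMAS AND PROOFS =====

-- number of increments position j has received after k one-block steps starting after bank t0
def cntR (n t0 : Nat) : Nat → Nat → Nat
  | 0, _ => 0
  | k+1, j => cntR n t0 k j + (if (t0 + (k+1)) % n = j then 1 else 0)

theorem foldl_const {α β : Type} (f : α → α) (l : List β) (init : α) :
    l.foldl (fun st _ => f st) init = f^[l.length] init := by
  induction l generalizing init with
  | nil => rfl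
  | cons b t ih => simpa [Function.iterate_succ_apply] using ih (f init)

theorem mod_succ_mod (a n : Nat) : (a % n + 1) % n = (a + 1) % n :=
  (Nat.ModEq.add_right 1 (Nat.mod_modEq a n))

theorem succ_divmod (n k : Nat) (hn : 0 < n) :
    (k+1) % n = (if k % n + 1 = n then 0 else k % n + 1) ∧
    (k+1) / n = (if k % n + 1 = n then k / n + 1 else k / n) := by
  have h := Nat.div_add_mod k n
  have hr := Nat.mod_lt k hn
  by_cases hc : k % n + 1 = n
  · have hk : k + 1 = n * (k / n + 1) := by rw [Nat.mul_add, Nat.mul_one]; omega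
    rw [hk]
    simp [hc, Nat.mul_mod_right, Nat.mul_div_cancel_left _ hn]
  · have hk : k + 1 = (k % n + 1) + n * (k / n) := by omega
    rw [hk, if_neg hc, if_neg hc]
    constructor
    · rw [Nat.add_mul_mod_self_left, Nat.mod_eq_of_lt (by omega)]
    · rw [Nat.add_mul_div_left _ _ hn, Nat.div_eq_of_lt (by omega), Nat.zero_add]

theorem ind_iff (n t0 j k : Nat) (ht : t0 < n) (hj : j < n) :
    ((t0 + (k+1)) % n = j) ↔ (k % n = (j + n - (t0+1)) % n) := by
  constructor
  · intro h
    have hm : Nat.ModEq n (t0 + (k+1)) j := by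
      show (t0 + (k+1)) % n = j % n
      rw [h, Nat.mod_eq_of_lt hj]
    have hm2 := hm.add_right (n - (t0+1))
    rw [show t0 + (k+1) + (n - (t0+1)) = k + n by omega,
        show j + (n - (t0+1)) = j + n - (t0+1) by omega] at hm2
    have hm3 : (k + n) % n = (j + n - (t0+1)) % n := hm2
    rwa [Nat.add_mod_right] at hm3
  · intro h
    have hm : Nat.ModEq n k (j + n - (t0+1)) := h
    have hm2 := hm.add_right (t0+1)
    rw [show j + n - (t0+1) + (t0+1) = j + n by omega,
        show k + (t0+1) = t0 + (k+1) by omega] at hm2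
    have hm3 : (t0 + (k+1)) % n = (j + n) % n := hm2
    rwa [Nat.add_mod_right, Nat.mod_eq_of_lt hj] at hm3

theorem cnt_closed (n t0 : Nat) (hn : 0 < n) (ht : t0 < n) (j : Nat) (hj : j < n) (k : Nat) :
    cntR n t0 k j = k / n + (if (j + n - (t0+1)) % n < k % n then 1 else 0) := by
  induction k with
  | zero => simp [cntR]
  | succ k ih =>
    have hd : (j + n - (t0+1)) % n < n := Nat.mod_lt _ hn
    have hkr : k % n < n := Nat.mod_lt _ hn
    obtain ⟨hm, hdv⟩ := succ_divmod n k hn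
    rw [cntR, ih]
    simp only [ind_iff n t0 j k ht hj, hm, hdv]
    set d := (j + n - (t0+1)) % n with hdd
    set r := k % n with hrr
    set q := k / n with hqq
    split_ifs <;> omega

theorem iter_spec (n t0 : Nat) (base : List Int) (hn : 0 < n) (ht : t0 < n)
    (hb : base.length = n) (k : Nat) :
    (stepA^[k] (t0, base)).1 = (t0 + k) % n ∧
    (stepA^[k] (t0, base)).2.length = n ∧
    ∀ j, j < n → (stepA^[k] (t0, base)).2.getD j 0 = base.getD j 0 + (cntR n t0 k j : Int) := by
  induction k with
  | zero =>
    refine ⟨by simp [Nat.mod_eq_of_lt ht], hb, ?_⟩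
    intro j hj; simp [cntR]
  | succ k ih =>
    obtain ⟨h1, h2, h3⟩ := ih
    rw [Function.iterate_succ_apply']
    set st := stepA^[k] (t0, base) with hst
    have ht' : (st.1 + 1) % st.2.length = (t0 + (k+1)) % n := by
      rw [h2, h1, mod_succ_mod, Nat.add_assoc]
    have htlt : (t0 + (k+1)) % n < n := Nat.mod_lt _ hn
    refine ⟨?_, ?_, ?_⟩
    · simp only [stepA, ht']
    · simp only [stepA, List.length_set, h2]
    · intro j hj
      simp only [stepA, ht']
      by_cases hjt : j = (t0 + (k+1)) % n
      · subst hjt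
        rw [List.getD_eq_getElem?_getD, List.getElem?_set_self (by omega),
            Option.getD_some, h3 _ hj, cntR, if_pos rfl]
        push_cast
        ring
      · rw [List.getD_eq_getElem?_getD, List.getElem?_set_ne (by omega),
            ← List.getD_eq_getElem?_getD, h3 _ hj, cntR, if_neg (fun h => hjt h.symm)]
        push_cast
        ring

theorem mod_shift (n t0 j : Nat) (hn : 0 < n) (ht : t0 < n) :
    PySem.Int.mod ((j:Int) - (t0:Int) - 1) (n:Int) = (((j + n - (t0+1)) % n : Nat) : Int) := by
  have hpos : (0:Int) < (n:Int) := by exact_mod_cast hn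
  rw [PySem.Int.mod_eq_emod_of_pos hpos]
  have he : (j:Int) - (t0:Int) - 1 = (((j + n - (t0+1) : Nat)) : Int) - (n:Int) := by
    have h1 : t0 + 1 ≤ j + n := by omega
    push_cast [Nat.cast_sub h1]
    ring
  rw [he, Int.sub_emod, Int.emod_self]
  simp [Int.emod_emod_of_dvd]

theorem getElem_eq_getD (l : List Int) (j : Nat) (h : j < l.length) : l[j] = l.getD j 0 :=
  (List.getD_eq_getElem l 0 h).symm

theorem redistribute_eq (banks : List Int) : redistributeA banks = redistributeB banks := by
  cases hmax : PySem.List.max? banks (fun x => x) with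
  | none => simp [redistributeA, redistributeB, hmax]
  | some m =>
    have hmem : m ∈ banks := PySem.List.max?_mem hmax
    have hne : banks ≠ [] := List.ne_nil_of_mem hmem
    have hsome : (PySem.List.index? banks m).isSome :=
      (PySem.List.index?_isSome_iff _ _).mpr hmem
    obtain ⟨t0, hidx⟩ := Option.isSome_iff_exists.mp hsome
    obtain ⟨htlt, hbt, -⟩ := PySem.List.getElem_of_index?_eq_some hidx
    have hn : 0 < banks.length := List.length_pos_of_ne_nil hne
    have hlen : PySem.List.len banks = (banks.length : Int) := by
      simp [PySem.List.len_eq]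
    have hb : (banks.set t0 0).length = banks.length := by simp
    have hbgetD : ∀ j, j < banks.length →
        (banks.set t0 0).getD j 0 = if j = t0 then 0 else banks.getD j 0 := by
      intro j hj
      by_cases hjt : j = t0
      · subst hjt
        rw [List.getD_eq_getElem?_getD, List.getElem?_set_self (by omega), if_pos rfl,
            Option.getD_some]
      · rw [List.getD_eq_getElem?_getD, List.getElem?_set_ne (fun h => hjt h.symm),
            ← List.getD_eq_getElem?_getD, if_neg hjt]
    simp only [redistributeA, redistributeB, hmax, hidx, Option.getD_some, hlen]
    rw [foldl_const, PySem.List.length_pyRange_one]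
    have hK : (m - 0).toNat = m.toNat := by norm_num
    rw [hK]
    obtain ⟨-, hitl, hitg⟩ := iter_spec banks.length t0 (banks.set t0 0) hn htlt hb m.toNat
    by_cases hm0 : m ≤ 0
    · rw [if_pos hm0]
      have hK0 : m.toNat = 0 := Int.toNat_of_nonpos hm0
      rw [hK0]
      apply List.ext_getElem
      · simp [PySem.List.length_pyRange_one]
      · intro j hj hj2
        have hjn : j < banks.length := by simpa using hj
        simp only [Function.iterate_zero, id_eq]
        rw [List.getElem_map, PySem.List.getElem_pyRange_one, zero_add,
            PySem.List.pyGetD_natCast, getElem_eq_getD _ _ (by omega), hbgetD j hjn]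
        by_cases hjt : j = t0
        · simp [hjt]
        · rw [if_neg hjt, if_neg (by exact_mod_cast hjt)]
    · rw [if_neg hm0]
      have hmK : ((m.toNat : Nat) : Int) = m := Int.toNat_of_nonneg (by omega)
      have hq : PySem.Int.floordiv m (banks.length : Int) = ((m.toNat / banks.length : Nat) : Int) := by
        rw [← hmK, PySem.Int.floordiv_natCast]; simp
      have hr : PySem.Int.mod m (banks.length : Int) = ((m.toNat % banks.length : Nat) : Int) := by
        rw [← hmK, PySem.Int.mod_natCast]; simp
      apply List.ext_getElem
      · rw [hitl, List.length_map, PySem.List.length_pyRange_one]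
        omega
      · intro j hj hj2
        have hjn : j < banks.length := by rwa [hitl] at hj
        rw [List.getElem_map, PySem.List.getElem_pyRange_one, zero_add,
            getElem_eq_getD _ _ (by omega), hitg j hjn, hbgetD j hjn,
            cnt_closed banks.length t0 hn htlt j hjn]
        simp only [hq, hr, mod_shift banks.length t0 j hn htlt, PySem.List.pyGetD_natCast]
        split_ifs <;> push_cast <;> omega

theorem loop_eq (fuel : Nat) (configs : List (List Int)) (seen : PySem.Dict (List Int) Int)
    (i : Int) (cur : List Int)
    (hinv : ∀ x, seen.get? x = (PySem.List.index? configs x).map (fun k => (k : Int)))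
    (hi : i = (configs.length : Int)) :
    loopA fuel configs cur = loopB fuel seen i cur := by
  induction fuel generalizing configs seen i cur with
  | zero => rfl
  | succ fuel ih =>
    simp only [loopA, loopB]
    by_cases hmem : cur ∈ configs
    · rw [if_pos hmem]
      have hsome := (PySem.List.index?_isSome_iff _ _).mpr hmem
      obtain ⟨k, hk⟩ := Option.isSome_iff_exists.mp hsome
      rw [hinv cur, hk]
      show ((configs.length : Int), (configs.length : Int) - ((k : Nat) : Int))
          = (i, i - ((k : Nat) : Int))
      rw [hi]
    · rw [if_neg hmem, hinv cur, (PySem.List.index?_eq_none_iff _ _).mpr hmem]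
      show loopA fuel (configs ++ [cur]) (redistributeA cur)
          = loopB fuel (seen.insert cur i) (i + 1) (redistributeB cur)
      rw [redistribute_eq]
      apply ih
      · intro x
        rw [PySem.Dict.get?_insert]
        by_cases hx : x = cur
        · subst hx
          rw [if_pos rfl, PySem.List.index?_append_singleton_self _ _ hmem, hi]
          simp
        · rw [if_neg hx, hinv x]
          by_cases hxc : x ∈ configs
          · rw [PySem.List.index?_append_of_mem _ hxc]
          · rw [(PySem.List.index?_eq_none_iff _ _).mpr hxc,
                (PySem.List.index?_eq_none_iff _ _).mpr (by simp [hxc, hx])]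
      · simp [hi]

-- ===== VERDICT (by name: the statement is the Claim_ definition above) =====
theorem solve_spec : Claim_equal_solve := by
  intro banks _ _
  unfold Spec_solve solve solve_alt
  rw [redistribute_eq]
  apply loop_eq
  · intro x
    rw [PySem.Dict.get?_insert]
    by_cases hx : x = banks
    · subst hx
      simp
    · rw [(PySem.List.index?_eq_none_iff _ _).mpr (by simp [hx])]
      simp [hx, PySem.Dict.get?_empty]
  · simp
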